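-- pv_equiv track=rewrite | github.com/LeeeeDain/Algorithm | 프로그래머스/레벨2_Heap_더맵게.py | solution
-- ===== SOURCE A (Python) =====
-- import heapq as hq
--
-- def solution(scoville, K):
--     answer = 0
--     hq.heapify(scoville)
--
--     while len(scoville) >= 2:
--         if scoville[0] >= K:
--             return answer
--         hq.heappush(scoville, hq.heappop(scoville) + hq.heappop(scoville)*2)
--         answer += 1
--
--     if scoville[0] >= K:
--         return answer
--     return -1
-- ===== SOURCE B (Python) =====
-- def solution(scoville, K):
--     # Repeated linear selection instead of a heap: scan the unordered pool for
--     # the minimum each round (min + remove), no ordered container maintained.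
--     # (Return-value equivalence only: A heap-permutes its argument in place; B does not mutate it.)
--     pool = list(scoville)
--     answer = 0
--     while len(pool) >= 2:
--         a = min(pool)
--         if a >= K:
--             return answer
--         pool.remove(a)
--         b = min(pool)
--         pool.remove(b)
--         pool.append(a + 2 * b)
--         answer += 1
--     if pool[0] >= K:
--         return answer
--     return -1
-- ===== Notes on version B (the rewrite author's own statement) =====
-- stated objective: simpler
-- what changed: Replaces the binary heap (heapq's heapify/heappop/heappush sift machinery) by repeated linear selection over an unordered pool: each round a full scan finds the minimum (min + remove), and the mix is appended at the end; no ordered structure is built or maintained, and the argument is not mutated (return-value equivalence only).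
import Mathlib
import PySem

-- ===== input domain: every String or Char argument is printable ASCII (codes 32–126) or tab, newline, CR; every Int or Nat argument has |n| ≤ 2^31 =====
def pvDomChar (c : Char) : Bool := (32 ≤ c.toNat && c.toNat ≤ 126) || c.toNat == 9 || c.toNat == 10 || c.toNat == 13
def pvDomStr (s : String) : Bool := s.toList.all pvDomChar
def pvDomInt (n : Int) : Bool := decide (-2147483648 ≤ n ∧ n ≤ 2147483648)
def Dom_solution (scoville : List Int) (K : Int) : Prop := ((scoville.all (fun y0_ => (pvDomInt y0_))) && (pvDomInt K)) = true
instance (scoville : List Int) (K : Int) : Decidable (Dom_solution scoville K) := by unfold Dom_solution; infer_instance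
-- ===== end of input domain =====

-- B replaces A's binary heap (CPython's heapq, ported below instruction for instruction)
-- by repeated linear selection over an unordered pool (min + remove each round);
-- return-value equivalence only — A heap-permutes its argument in place, B does not mutate it.

-- ===== PORT A =====
-- CPython heapq. _siftdown(heap, startpos, pos): newitem = heap[pos]; bubble up while pos > startpos.
-- Indices produced by heapq are always in range, so List.getD i 0 is exact there.
def hqSiftdownLoop (heap : List Int) (startpos pos : Nat) (newitem : Int) : List Int :=
  if _h : startpos < pos then
    let parentpos := (pos - 1) / 2           -- (pos - 1) >> 1
    let parent := heap.getD parentpos 0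
    if newitem < parent then
      hqSiftdownLoop (heap.set pos parent) startpos parentpos newitem
    else
      heap.set pos newitem                   -- heap[pos] = newitem
  else
    heap.set pos newitem
termination_by pos
decreasing_by have := Nat.div_le_self (pos - 1) 2; omega

def hqSiftdown (heap : List Int) (startpos pos : Nat) : List Int :=
  hqSiftdownLoop heap startpos pos (heap.getD pos 0)

-- _siftup's descending loop: move the smaller child up until pos has no child;
-- returns the heap together with the final pos.
def hqSiftupLoop (heap : List Int) (endpos pos : Nat) : List Int × Nat :=
  if _h : 2 * pos + 1 < endpos then          -- childpos < endpos
    let childpos :=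
      if 2 * pos + 2 < endpos ∧ ¬ (heap.getD (2 * pos + 1) 0 < heap.getD (2 * pos + 2) 0)
      then 2 * pos + 2 else 2 * pos + 1      -- rightpos test
    hqSiftupLoop (heap.set pos (heap.getD childpos 0)) endpos childpos
  else
    (heap, pos)
termination_by endpos - pos
decreasing_by split_ifs <;> omega

def hqSiftup (heap : List Int) (pos : Nat) : List Int :=
  let newitem := heap.getD pos 0
  let r := hqSiftupLoop heap heap.length pos
  hqSiftdown (r.1.set r.2 newitem) pos r.2   -- heap[pos] = newitem; _siftdown(heap, startpos, pos)

def hqHeappush (heap : List Int) (item : Int) : List Int :=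
  hqSiftdown (heap ++ [item]) 0 heap.length  -- heap.append(item); _siftdown(heap, 0, len(heap)-1)

def hqHeappop (heap : List Int) : Int × List Int :=
  let lastelt := heap.getD (heap.length - 1) 0   -- lastelt = heap.pop()
  let h := heap.dropLast
  if h.isEmpty then (lastelt, h)
  else (h.getD 0 0, hqSiftup (h.set 0 lastelt) 0)

def hqHeapify (x : List Int) : List Int :=
  ((List.range (x.length / 2)).reverse).foldl (fun h i => hqSiftup h i) x
  -- for i in reversed(range(n//2)): _siftup(x, i)

-- the while loop; fuel (= the initial heap size) only makes the recursion structural,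
-- each iteration shrinks the heap by one so fuel never runs out before len < 2
def solLoop : Nat → List Int → Int → Int → Int
  | 0, heap, K, answer => if heap.getD 0 0 ≥ K then answer else -1
  | fuel + 1, heap, K, answer =>
    if 2 ≤ heap.length then
      if heap.getD 0 0 ≥ K then answer
      else
        let p1 := hqHeappop heap
        let p2 := hqHeappop p1.2
        solLoop fuel (hqHeappush p2.2 (p1.1 + p2.1 * 2)) K (answer + 1)
    else
      if heap.getD 0 0 ≥ K then answer else -1

def solution (scoville : List Int) (K : Int) : Int :=
  solLoop scoville.length (hqHeapify scoville) K 0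

-- ===== PORT B =====
-- a = min(pool); if a >= K: return answer; pool.remove(a); b = min(pool); pool.remove(b);
-- pool.append(a + 2*b); answer += 1; fuel (= the initial pool size) only makes the recursion structural
def altLoop : Nat → List Int → Int → Int → Int
  | 0, pool, K, ans => if pool.getD 0 0 ≥ K then ans else -1
  | fuel + 1, pool, K, ans =>
    if 2 ≤ pool.length then
      let a := (PySem.List.min? pool (fun x => x)).getD 0
      if a ≥ K then ans
      else
        let p1 := (PySem.List.remove? pool a).getD []
        let b := (PySem.List.min? p1 (fun x => x)).getD 0
        let p2 := (PySem.List.remove? p1 b).getD []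
        altLoop fuel (p2 ++ [a + 2 * b]) K (ans + 1)
    else
      if pool.getD 0 0 ≥ K then ans else -1

def solution_alt (scoville : List Int) (K : Int) : Int :=
  altLoop scoville.length scoville K 0

-- ===== PRECONDITION & SPEC =====
-- Pre_ excludes only the empty list, on which Python A raises IndexError (scoville[0]); B raises there too.
def Pre_solution (scoville : List Int) (K : Int) : Prop := scoville ≠ []
instance (scoville : List Int) (K : Int) : Decidable (Pre_solution scoville K) := by
  unfold Pre_solution; infer_instance
def pvWitness_solution : List Int × Int := ([1, 2, 9], 7)

def Spec_solution (scoville : List Int) (K : Int) (out : Int) : Prop := out = solution_alt scoville K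
instance (scoville : List Int) (K : Int) (out : Int) : Decidable (Spec_solution scoville K out) := by unfold Spec_solution; infer_instance

-- ===== CLAIM (what is proved, stated in full; the proofs are below) =====
def Claim_equal_solution : Prop := ∀ (scoville : List Int) (K : Int), Dom_solution scoville K → Pre_solution scoville K → Spec_solution scoville K (solution scoville K)

-- ===== LEMMAS AND PROOFS =====

-- length fact for the heap operations
theorem hqSiftdownLoop_length (heap : List Int) (s p : Nat) (x : Int) :
    (hqSiftdownLoop heap s p x).length = heap.length := by
  fun_induction hqSiftdownLoop <;> simp_all

-- popping the minimum shrinks the pool by one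
theorem popMin_length (pool : List Int) (h : pool ≠ []) :
    ((PySem.List.remove? pool ((PySem.List.min? pool (fun x => x)).getD 0)).getD []).length + 1
      = pool.length := by
  have hne : PySem.List.min? pool (fun x => x) ≠ none := by
    rw [Ne, PySem.List.min?_eq_none_iff]; exact h
  obtain ⟨m, hm⟩ := Option.ne_none_iff_exists'.mp hne
  have hmem := PySem.List.min?_mem hm
  rw [hm, Option.getD_some, PySem.List.remove?_eq_some_erase pool m hmem, Option.getD_some,
    List.length_erase_of_mem hmem]
  have := List.length_pos_of_ne_nil h
  omega

theorem multiset_set (h : List Int) (i : Nat) (x : Int) (hi : i < h.length) :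
    ((h.set i x : List Int) : Multiset Int) + {h.getD i 0} = (h : Multiset Int) + {x} := by
  induction h generalizing i with
  | nil => simp at hi
  | cons a t ih =>
    cases i with
    | zero =>
      simp only [List.set_cons_zero, List.getD_cons_zero]
      rw [add_comm, Multiset.singleton_add, add_comm, Multiset.singleton_add]
      exact (Multiset.cons_swap a x ↑t)
    | succ n =>
      rw [List.set_cons_succ, List.getD_cons_succ, ← Multiset.cons_coe, ← Multiset.cons_coe,
        Multiset.cons_add, Multiset.cons_add, ih n (by simpa using hi)]

theorem getD_set_ne (h : List Int) (i : Nat) (x : Int) (j : Nat) (hij : i ≠ j) :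
    (h.set i x).getD j 0 = h.getD j 0 := by
  simp [List.getD_eq_getElem?_getD, List.getElem?_set_ne hij]

def Desc (p0 p : Nat) : Prop := ∃ k, (fun j => (j - 1) / 2)^[k] p = p0

theorem desc_ge {p0 p : Nat} (h : Desc p0 p) : p0 ≤ p := by
  obtain ⟨k, hk⟩ := h
  induction k generalizing p with
  | zero => simp at hk; omega
  | succ k ih =>
    have := ih (p := (p - 1) / 2) (by simpa [Function.iterate_succ_apply] using hk)
    have := Nat.div_le_self (p - 1) 2; omega

theorem desc_par {p0 p : Nat} (h : Desc p0 p) (hne : p ≠ p0) : Desc p0 ((p - 1) / 2) := by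
  obtain ⟨k, hk⟩ := h
  cases k with
  | zero => simp at hk; omega
  | succ k => exact ⟨k, by simpa [Function.iterate_succ_apply] using hk⟩

theorem getD_set_self (h : List Int) (i : Nat) (x : Int) (hi : i < h.length) :
    (h.set i x).getD i 0 = x := by
  simp [List.getD_eq_getElem?_getD, hi]

theorem sdl_heap (h : List Int) (p0 p : Nat) (x : Int) (hp : p < h.length) (hd : Desc p0 p)
    (H1 : ∀ j, 0 < j → j < h.length → p0 ≤ (j - 1) / 2 → j ≠ p →
      h.getD ((j - 1) / 2) 0 ≤ h.getD j 0)
    (H2 : ∀ j, 0 < j → j < h.length → (j - 1) / 2 = p → x ≤ h.getD j 0)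
    (H3 : ∀ j, 0 < j → j < h.length → (j - 1) / 2 = p → p0 < p →
      h.getD ((p - 1) / 2) 0 ≤ h.getD j 0) :
    ∀ j, 0 < j → j < h.length → p0 ≤ (j - 1) / 2 →
      (hqSiftdownLoop h p0 p x).getD ((j - 1) / 2) 0 ≤ (hqSiftdownLoop h p0 p x).getD j 0 := by
  fun_induction hqSiftdownLoop h p0 p x
  case case1 h p hsp pp par hlt ih =>
    have hppd : pp = (p - 1) / 2 := rfl
    have hpplt : pp < p := by have := Nat.div_le_self (p - 1) 2; omega
    have hdpp : Desc p0 pp := desc_par hd (by omega)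
    have hp0pp : p0 ≤ pp := desc_ge hdpp
    rw [show h.length = (h.set p par).length by simp]
    apply ih (by rw [List.length_set]; omega) hdpp
    · -- H1'
      intro j hj0 hjl hjp0 hjpp
      rw [List.length_set] at hjl
      by_cases hjp : j = p
      · subst hjp
        rw [show (j - 1) / 2 = pp from hppd.symm, getD_set_self _ _ _ hp,
          getD_set_ne _ _ _ pp (by omega)]
      · by_cases hjc : (j - 1) / 2 = p
        · rw [hjc, getD_set_self _ _ _ hp, getD_set_ne _ _ _ j (by omega)]
          have := H3 j hj0 hjl hjc hsp
          rw [← hppd] at this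
          exact this
        · rw [getD_set_ne _ _ _ _ (show p ≠ (j - 1) / 2 by omega),
            getD_set_ne _ _ _ _ (show p ≠ j by omega)]
          exact H1 j hj0 hjl hjp0 hjp
    · -- H2'
      intro j hj0 hjl hjpar
      rw [List.length_set] at hjl
      by_cases hjp : j = p
      · subst hjp
        rw [getD_set_self _ _ _ hp]
        exact le_of_lt hlt
      · rw [getD_set_ne _ _ _ _ (by omega)]
        have hB := H1 j hj0 hjl (by omega) hjp
        rw [hjpar] at hB
        exact le_trans (le_of_lt hlt) hB
    · -- H3'
      intro j hj0 hjl hjpar hp0lt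
      rw [List.length_set] at hjl
      have hA := H1 pp (by omega) (by omega)
        (desc_ge (desc_par hdpp (by omega))) (by omega)
      rw [getD_set_ne _ _ _ _ (show p ≠ (pp - 1) / 2 by
        have := Nat.div_le_self (pp - 1) 2; omega)]
      by_cases hjp : j = p
      · subst hjp
        rw [getD_set_self _ _ _ hp]
        exact hA
      · rw [getD_set_ne _ _ _ _ (show p ≠ j by omega)]
        have hB := H1 j hj0 hjl (by omega) hjp
        rw [hjpar] at hB
        exact le_trans hA hB
  case case2 h p hsp pp par hge =>
    intro j hj0 hjl hjp0
    by_cases hjp : j = p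
    · subst hjp
      rw [getD_set_self _ _ _ hp,
        getD_set_ne _ _ _ _ (show j ≠ (j - 1) / 2 by have := Nat.div_le_self (j - 1) 2; omega)]
      exact not_lt.1 hge
    · by_cases hjc : (j - 1) / 2 = p
      · rw [hjc, getD_set_self _ _ _ hp, getD_set_ne _ _ _ j (by omega)]
        exact H2 j hj0 hjl hjc
      · rw [getD_set_ne _ _ _ _ (show p ≠ (j - 1) / 2 by omega),
          getD_set_ne _ _ _ _ (show p ≠ j by omega)]
        exact H1 j hj0 hjl hjp0 hjp
  case case3 h p hsp =>
    have hpp0 : p = p0 := le_antisymm (by omega) (desc_ge hd)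
    intro j hj0 hjl hjp0
    by_cases hjp : j = p
    · subst hjp
      exfalso
      have := Nat.div_le_self (j - 1) 2; omega
    · by_cases hjc : (j - 1) / 2 = p
      · rw [hjc, getD_set_self _ _ _ hp, getD_set_ne _ _ _ j (by omega)]
        exact H2 j hj0 hjl hjc
      · rw [getD_set_ne _ _ _ _ (show p ≠ (j - 1) / 2 by omega),
          getD_set_ne _ _ _ _ (show p ≠ j by omega)]
        exact H1 j hj0 hjl hjp0 hjp

theorem desc_child {p0 p c : Nat} (h : Desc p0 p) (hc : (c - 1) / 2 = p) : Desc p0 c := by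
  obtain ⟨k, hk⟩ := h
  exact ⟨k + 1, by simpa [Function.iterate_succ_apply, hc] using hk⟩

theorem sul_spec (h : List Int) (e p0 p : Nat) (he : e = h.length) (hp : p < h.length)
    (hd : Desc p0 p)
    (HA : ∀ j, 0 < j → j < h.length → p0 ≤ (j - 1) / 2 → j ≠ p → (j - 1) / 2 ≠ p →
      h.getD ((j - 1) / 2) 0 ≤ h.getD j 0)
    (HB : ∀ j, 0 < j → j < h.length → (j - 1) / 2 = p → p ≠ p0 →
      h.getD ((p - 1) / 2) 0 ≤ h.getD j 0) :
    (hqSiftupLoop h e p).2 < h.length ∧ Desc p0 (hqSiftupLoop h e p).2 ∧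
    (∀ y : Int, (((hqSiftupLoop h e p).1.set (hqSiftupLoop h e p).2 y : List Int) : Multiset Int)
        = ((h.set p y : List Int) : Multiset Int)) ∧
    (∀ j, 0 < j → j < h.length → p0 ≤ (j - 1) / 2 → j ≠ (hqSiftupLoop h e p).2 →
      (j - 1) / 2 ≠ (hqSiftupLoop h e p).2 →
      (hqSiftupLoop h e p).1.getD ((j - 1) / 2) 0 ≤ (hqSiftupLoop h e p).1.getD j 0) ∧
    ¬ (2 * (hqSiftupLoop h e p).2 + 1 < e) := by
  fun_induction hqSiftupLoop h e p
  case case1 h q hc c ih =>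
    have hcdef : c = if 2 * q + 2 < e ∧ ¬ (h.getD (2 * q + 1) 0 < h.getD (2 * q + 2) 0)
        then 2 * q + 2 else 2 * q + 1 := rfl
    have hcb : 2 * q + 1 ≤ c ∧ c < e ∧ (c - 1) / 2 = q := by
      by_cases hif : 2 * q + 2 < e ∧ ¬ (h.getD (2 * q + 1) 0 < h.getD (2 * q + 2) 0)
      · rw [hcdef, if_pos hif]; exact ⟨by omega, hif.1, by omega⟩
      · rw [hcdef, if_neg hif]; exact ⟨le_refl _, hc, by omega⟩
    have hcmin : ∀ j, 0 < j → j < e → (j - 1) / 2 = q → j ≠ c → h.getD c 0 ≤ h.getD j 0 := by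
      intro j hj0 hje hjq hjc
      by_cases hif : 2 * q + 2 < e ∧ ¬ (h.getD (2 * q + 1) 0 < h.getD (2 * q + 2) 0)
      · rw [hcdef, if_pos hif] at hjc ⊢
        have : j = 2 * q + 1 := by omega
        subst this; exact not_lt.1 hif.2
      · rw [hcdef, if_neg hif] at hjc ⊢
        have : j = 2 * q + 2 := by omega
        subst this
        rw [not_and_or, not_not] at hif
        rcases hif with h1 | h2
        · omega
        · exact le_of_lt h2
    have hq0 : p0 ≤ q := desc_ge hd
    have hclen : c < h.length := by omega
    have hqc : q ≠ c := by omega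
    have hdC : Desc p0 c := desc_child hd hcb.2.2
    obtain ⟨ih1, ih2, ih3, ih4, ih5⟩ := ih (by simp [he]) (by rw [List.length_set]; omega) hdC
      (by -- HA'
        intro j hj0 hjl hjp0 hjc hjcpar
        rw [List.length_set] at hjl
        by_cases hjq : j = q
        · subst hjq
          rw [getD_set_self _ _ _ hp,
            getD_set_ne _ _ _ _ (show j ≠ (j - 1) / 2 by have := Nat.div_le_self (j - 1) 2; omega)]
          exact HB c (by omega) hclen hcb.2.2 (by omega)
        · by_cases hjpq : (j - 1) / 2 = q
          · rw [hjpq, getD_set_self _ _ _ hp, getD_set_ne _ _ _ j (by omega)]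
            exact hcmin j hj0 (by omega) hjpq hjc
          · rw [getD_set_ne _ _ _ _ (show q ≠ (j - 1) / 2 by omega),
              getD_set_ne _ _ _ _ (show q ≠ j by omega)]
            exact HA j hj0 hjl hjp0 hjq hjpq)
      (by -- HB'
        intro j hj0 hjl hjpar hcp0
        rw [List.length_set] at hjl
        rw [hcb.2.2, getD_set_self _ _ _ hp, getD_set_ne _ _ _ j (by omega)]
        have hAj := HA j hj0 hjl (by omega) (by omega) (by omega)
        rw [hjpar] at hAj
        exact hAj)
    rw [List.length_set] at ih1
    refine ⟨ih1, ih2, ?_, ?_, ih5⟩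
    · -- multiset
      intro y
      rw [ih3 y]
      have A := multiset_set (h.set q (h.getD c 0)) c y (by rw [List.length_set]; omega)
      rw [getD_set_ne _ _ _ _ hqc] at A
      have B := multiset_set h q (h.getD c 0) (by omega)
      have C := multiset_set h q y (by omega)
      have key : ((h.set q (h.getD c 0)).set c y : Multiset Int) + ({h.getD c 0} + {h.getD q 0})
          = ((h.set q y : List Int) : Multiset Int) + ({h.getD c 0} + {h.getD q 0}) := by
        calc ((h.set q (h.getD c 0)).set c y : Multiset Int) + ({h.getD c 0} + {h.getD q 0})
            = (((h.set q (h.getD c 0)).set c y : Multiset Int) + {h.getD c 0}) + {h.getD q 0} := by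
              abel
          _ = (((h.set q (h.getD c 0)) : Multiset Int) + {y}) + {h.getD q 0} := by rw [A]
          _ = (((h.set q (h.getD c 0)) : Multiset Int) + {h.getD q 0}) + {y} := by abel
          _ = (((h : Multiset Int)) + {h.getD c 0}) + {y} := by rw [B]
          _ = (((h : Multiset Int)) + {y}) + {h.getD c 0} := by abel
          _ = (((h.set q y : List Int) : Multiset Int) + {h.getD q 0}) + {h.getD c 0} := by rw [C]
          _ = ((h.set q y : List Int) : Multiset Int) + ({h.getD c 0} + {h.getD q 0}) := by abel
      exact add_right_cancel key
    · -- edges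
      intro j hj0 hjl hjp0 hj1 hj2
      exact ih4 j hj0 (by rw [List.length_set]; omega) hjp0 hj1 hj2
  case case2 h q hc =>
    exact ⟨hp, hd, fun y => rfl, HA, hc⟩

theorem desc_self (p : Nat) : Desc p p := ⟨0, rfl⟩

theorem sdl_multiset (h : List Int) (s p : Nat) (x : Int) (hp : p < h.length) :
    ((hqSiftdownLoop h s p x : List Int) : Multiset Int) + {h.getD p 0}
      = (h : Multiset Int) + {x} := by
  fun_induction hqSiftdownLoop h s p x
  case case1 a b c d e f g =>
    have hd : d = (b - 1) / 2 := rfl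
    have hdlt : d < b := by have := Nat.div_le_self (b - 1) 2; omega
    have g' := g (by rw [List.length_set]; omega)
    rw [getD_set_ne a b e d (by omega)] at g'
    have m := multiset_set a b e hp
    have key : ↑(hqSiftdownLoop (a.set b e) s d x) + {a.getD b 0} + ({e} : Multiset Int)
        = ↑a + {x} + ({e} : Multiset Int) := by
      have he : e = a.getD d 0 := rfl
      calc ↑(hqSiftdownLoop (a.set b e) s d x) + {a.getD b 0} + ({e} : Multiset Int)
          = (↑(hqSiftdownLoop (a.set b e) s d x) + {a.getD d 0}) + {a.getD b 0} := by
            rw [← he]; abel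
        _ = (↑(a.set b e) + {x}) + {a.getD b 0} := by rw [g']
        _ = (↑(a.set b e) + {a.getD b 0}) + {x} := by abel
        _ = (↑a + {e}) + {x} := by rw [m]
        _ = ↑a + {x} + {e} := by abel
    exact add_right_cancel key
  case case2 => exact multiset_set _ _ _ hp
  case case3 => exact multiset_set _ _ _ hp

theorem siftup_spec (h : List Int) (p : Nat) (hp : p < h.length)
    (pre : ∀ j, 0 < j → j < h.length → p + 1 ≤ (j - 1) / 2 →
      h.getD ((j - 1) / 2) 0 ≤ h.getD j 0) :
    (hqSiftup h p).length = h.length ∧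
    ((hqSiftup h p : List Int) : Multiset Int) = (h : Multiset Int) ∧
    (∀ j, 0 < j → j < h.length → p ≤ (j - 1) / 2 →
      (hqSiftup h p).getD ((j - 1) / 2) 0 ≤ (hqSiftup h p).getD j 0) := by
  obtain ⟨s1, s2, s3, s4, s5⟩ := sul_spec h h.length p p rfl hp (desc_self p)
    (fun j hj0 hjl hjp hne hpar => pre j hj0 hjl (by omega))
    (fun j hj0 hjl hjpar hne => absurd rfl hne)
  simp only [hqSiftup, hqSiftdown]
  set r := hqSiftupLoop h h.length p with hr
  set x := h.getD p 0 with hx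
  have glen : (r.1.set r.2 x).length = h.length := by
    have := congrArg Multiset.card (s3 x)
    simpa using this
  have hrlen : r.1.length = h.length := by rw [List.length_set] at glen; exact glen
  have hgr : (r.1.set r.2 x).getD r.2 0 = x := getD_set_self _ _ _ (by omega)
  have hms : ((hqSiftdownLoop (r.1.set r.2 x) p r.2 ((r.1.set r.2 x).getD r.2 0) : List Int) :
      Multiset Int) = (h : Multiset Int) := by
    rw [hgr]
    have A := sdl_multiset (r.1.set r.2 x) p r.2 ((r.1.set r.2 x).getD r.2 0) (by omega)
    rw [hgr] at A
    have := add_right_cancel A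
    rw [this, s3 x]
    have B := multiset_set h p x hp
    rw [← hx] at B
    exact add_right_cancel B
  have hlen : (hqSiftdownLoop (r.1.set r.2 x) p r.2 ((r.1.set r.2 x).getD r.2 0)).length
      = h.length := by rw [hqSiftdownLoop_length, glen]
  refine ⟨hlen, hms, ?_⟩
  have hedges := sdl_heap (r.1.set r.2 x) p r.2 ((r.1.set r.2 x).getD r.2 0)
    (by omega) s2
    (fun j hj0 hjl hjp hne => by
      rw [List.length_set] at hjl
      by_cases hjc : (j - 1) / 2 = r.2
      · exfalso; omega
      · rw [getD_set_ne _ _ _ _ (show r.2 ≠ (j - 1) / 2 by omega),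
          getD_set_ne _ _ _ _ (show r.2 ≠ j by omega)]
        exact s4 j hj0 (by omega) hjp hne hjc)
    (fun j hj0 hjl hjc => by exfalso; rw [List.length_set] at hjl; omega)
    (fun j hj0 hjl hjc _ => by exfalso; rw [List.length_set] at hjl; omega)
  intro j hj0 hjl hjp
  exact hedges j hj0 (by omega) hjp

def IsHeap (h : List Int) : Prop :=
  ∀ j, 0 < j → j < h.length → h.getD ((j - 1) / 2) 0 ≤ h.getD j 0

theorem desc_zero (p : Nat) : Desc 0 p := by
  induction p using Nat.strong_induction_on with
  | _ p ih =>
    rcases Nat.eq_zero_or_pos p with h | h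
    · exact h ▸ desc_self 0
    · obtain ⟨k, hk⟩ := ih ((p - 1) / 2) (by have := Nat.div_le_self (p-1) 2; omega)
      exact ⟨k + 1, by simpa [Function.iterate_succ_apply] using hk⟩

theorem heapify_aux (x : List Int) : ∀ m, m ≤ x.length / 2 → ∀ h : List Int,
    h.length = x.length →
    (∀ j, 0 < j → j < h.length → m ≤ (j - 1) / 2 → h.getD ((j - 1) / 2) 0 ≤ h.getD j 0) →
    (((List.range m).reverse).foldl (fun h i => hqSiftup h i) h).length = h.length ∧
    ((((List.range m).reverse).foldl (fun h i => hqSiftup h i) h : List Int) : Multiset Int)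
      = (h : Multiset Int) ∧
    IsHeap (((List.range m).reverse).foldl (fun h i => hqSiftup h i) h) := by
  intro m
  induction m with
  | zero =>
    intro _ h hlen hQ
    exact ⟨rfl, rfl, fun j hj0 hjl => hQ j hj0 hjl (by omega)⟩
  | succ m ih =>
    intro hm h hlen hQ
    have hstep : ((List.range (m + 1)).reverse) = m :: (List.range m).reverse := by
      simp [List.range_succ]
    rw [hstep]
    simp only [List.foldl_cons]
    have hpm : m < h.length := by omega
    obtain ⟨t1, t2, t3⟩ := siftup_spec h m hpm (fun j hj0 hjl hjp => hQ j hj0 hjl (by omega))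
    obtain ⟨r1, r2, r3⟩ := ih (by omega) (hqSiftup h m) (by omega)
      (fun j hj0 hjl hjp => t3 j hj0 (by omega) hjp)
    exact ⟨by omega, by rw [r2, t2], r3⟩

theorem heapify_spec (x : List Int) :
    (hqHeapify x).length = x.length ∧
    ((hqHeapify x : List Int) : Multiset Int) = (x : Multiset Int) ∧ IsHeap (hqHeapify x) := by
  exact heapify_aux x (x.length / 2) (le_refl _) x rfl
    (fun j hj0 hjl hjp => by exfalso; omega)

theorem heap_root_le (h : List Int) (hh : IsHeap h) :
    ∀ j, j < h.length → h.getD 0 0 ≤ h.getD j 0 := by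
  intro j
  induction j using Nat.strong_induction_on with
  | _ j ih =>
    intro hj
    rcases Nat.eq_zero_or_pos j with h0 | h0
    · subst h0; exact le_refl _
    · exact le_trans
        (ih ((j - 1) / 2) (by have := Nat.div_le_self (j-1) 2; omega)
          (by have := Nat.div_le_self (j-1) 2; omega))
        (hh j h0 hj)

theorem getD_append_left (h : List Int) (x : Int) (j : Nat) (hj : j < h.length) :
    (h ++ [x]).getD j 0 = h.getD j 0 := by
  simp [List.getD_eq_getElem?_getD, List.getElem?_append_left hj]

theorem heappush_spec (h : List Int) (x : Int) (hh : IsHeap h) :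
    IsHeap (hqHeappush h x) ∧
    ((hqHeappush h x : List Int) : Multiset Int) = (h : Multiset Int) + {x} := by
  have hlen : (h ++ [x]).length = h.length + 1 := by simp
  have hget : (h ++ [x]).getD h.length 0 = x := by
    simp [List.getD_eq_getElem?_getD]
  have hedges := sdl_heap (h ++ [x]) 0 h.length ((h ++ [x]).getD h.length 0)
    (by omega) (desc_zero _)
    (fun j hj0 hjl hjp hne => by
      rw [getD_append_left _ _ _ (by omega),
        getD_append_left _ _ _ (by have := Nat.div_le_self (j-1) 2; omega)]
      exact hh j hj0 (by omega))
    (fun j hj0 hjl hjc => by exfalso; omega)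
    (fun j hj0 hjl hjc _ => by exfalso; omega)
  have hms := sdl_multiset (h ++ [x]) 0 h.length ((h ++ [x]).getD h.length 0) (by omega)
  rw [hget] at hms
  constructor
  · intro j hj0 hjl
    rw [hqHeappush, hqSiftdown] at hjl ⊢
    rw [hqSiftdownLoop_length] at hjl
    exact hedges j hj0 (by omega) (by omega)
  · rw [hqHeappush, hqSiftdown, hget, add_right_cancel hms]
    exact (Multiset.cons_inj_right x).mp rfl

theorem getD_dropLast (h : List Int) (j : Nat) (hj : j < h.length - 1) :
    h.dropLast.getD j 0 = h.getD j 0 := by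
  rw [List.getD_eq_getElem _ _ (by simp; omega), List.getD_eq_getElem _ _ (by omega),
    List.getElem_dropLast]

theorem heappop_spec (h : List Int) (hh : IsHeap h) (hne : h ≠ []) :
    (hqHeappop h).1 = h.getD 0 0 ∧ IsHeap (hqHeappop h).2 ∧
    (((hqHeappop h).2 : List Int) : Multiset Int) + {h.getD 0 0} = (h : Multiset Int) := by
  have hlen0 : 0 < h.length := List.length_pos_of_ne_nil hne
  have hsplit : h.dropLast ++ [h.getD (h.length - 1) 0] = h := by
    rw [List.getD_eq_getElem _ _ (by omega), ← List.getLast_eq_getElem hne]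
    exact List.dropLast_concat_getLast hne
  have coe_app : ∀ (l : List Int) (y : Int),
      ((l ++ [y] : List Int) : Multiset Int) = (l : Multiset Int) + {y} :=
    fun l y => (Multiset.cons_inj_right y).mp rfl
  have hdms : (h.dropLast : Multiset Int) + {h.getD (h.length - 1) 0} = (h : Multiset Int) := by
    conv_rhs => rw [← hsplit]
    exact (coe_app _ _).symm
  have hdlen : h.dropLast.length = h.length - 1 := by simp
  by_cases h1 : h.length = 1
  · have hemp : h.dropLast.isEmpty = true := by
      rw [List.isEmpty_iff_length_eq_zero]; omega
    rw [hqHeappop]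
    simp only [hemp, if_true]
    refine ⟨by rw [show h.length - 1 = 0 by omega], fun j hj0 hjl => by omega, ?_⟩
    rw [show (0:Nat) = h.length - 1 by omega]
    exact hdms
  · have hemp : ¬ (h.dropLast.isEmpty = true) := by
      rw [List.isEmpty_iff_length_eq_zero]; omega
    rw [hqHeappop]
    simp only [if_neg hemp]
    have hset0 : (0:Nat) < h.dropLast.length := by omega
    have hg0 : h.dropLast.getD 0 0 = h.getD 0 0 := getD_dropLast h 0 (by omega)
    obtain ⟨t1, t2, t3⟩ := siftup_spec (h.dropLast.set 0 (h.getD (h.length - 1) 0)) 0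
      (by rw [List.length_set]; omega)
      (fun j hj0 hjl hjp => by
        rw [List.length_set] at hjl
        rw [getD_set_ne _ _ _ _ (show (0:Nat) ≠ (j-1)/2 by omega),
          getD_set_ne _ _ _ _ (show (0:Nat) ≠ j by omega),
          getD_dropLast h _ (by have := Nat.div_le_self (j-1) 2; omega),
          getD_dropLast h _ (by omega)]
        exact hh j hj0 (by omega))
    refine ⟨hg0, ?_, ?_⟩
    · intro j hj0 hjl
      rw [t1, List.length_set] at hjl
      exact t3 j hj0 (by rw [List.length_set]; omega) (by omega)
    · rw [t2]
      have hm := multiset_set h.dropLast 0 (h.getD (h.length - 1) 0) hset0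
      rw [hg0] at hm
      rw [hm]
      exact hdms

-- B-side: popping the minimum — value and multiset
theorem popMin_spec (pool : List Int) (h : pool ≠ []) :
    ((PySem.List.min? pool (fun x => x)).getD 0) ∈ pool ∧
    (∀ x ∈ pool, ((PySem.List.min? pool (fun x => x)).getD 0) ≤ x) ∧
    (((PySem.List.remove? pool ((PySem.List.min? pool (fun x => x)).getD 0)).getD [] :
        List Int) : Multiset Int) + {(PySem.List.min? pool (fun x => x)).getD 0}
      = (pool : Multiset Int) := by
  have hne : PySem.List.min? pool (fun x => x) ≠ none := by
    rw [Ne, PySem.List.min?_eq_none_iff]; exact h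
  obtain ⟨m, hm⟩ := Option.ne_none_iff_exists'.mp hne
  have hmem := PySem.List.min?_mem hm
  have hmin := PySem.List.min?_isMin hm
  rw [hm, Option.getD_some, PySem.List.remove?_eq_some_erase pool m hmem, Option.getD_some]
  refine ⟨hmem, fun x hx => hmin x hx, ?_⟩
  rw [add_comm, Multiset.singleton_add, ← Multiset.coe_erase,
    Multiset.cons_erase (show m ∈ (pool : Multiset Int) by simpa using hmem)]

-- the heap's root is the minimum of any list with the same multiset
theorem heap_root_eq_min (h pool : List Int) (hh : IsHeap h)
    (hne : pool ≠ []) (hms : (h : Multiset Int) = (pool : Multiset Int)) :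
    h.getD 0 0 = (PySem.List.min? pool (fun x => x)).getD 0 := by
  obtain ⟨hmem, hmin, _⟩ := popMin_spec pool hne
  set a := (PySem.List.min? pool (fun x => x)).getD 0 with ha
  have hlen : h.length = pool.length := by
    have := congrArg Multiset.card hms; simpa using this
  have hlp : 0 < pool.length := List.length_pos_of_ne_nil hne
  have hmem_h : a ∈ h := by
    have : a ∈ (h : Multiset Int) := by rw [hms]; simpa using hmem
    simpa using this
  have hle : h.getD 0 0 ≤ a := by
    obtain ⟨j, hj, hEq⟩ := List.getElem_of_mem hmem_h
    have := heap_root_le h hh j hj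
    rw [List.getD_eq_getElem _ _ hj, hEq] at this
    exact this
  have hroot_mem : h.getD 0 0 ∈ pool := by
    have h1 : h.getD 0 0 ∈ h := by
      rw [List.getD_eq_getElem _ _ (by omega)]
      exact List.getElem_mem _
    have : h.getD 0 0 ∈ (h : Multiset Int) := by simpa using h1
    rw [hms] at this
    simpa using this
  exact le_antisymm hle (hmin _ hroot_mem)

theorem cancel_singleton (p : Multiset Int) (t : Multiset Int) (a : Int)
    (hEq : p + {a} = t + {a}) : p = t := add_right_cancel hEq

theorem getD_zero_eq_of_small (h pool : List Int)
    (hms : (h : Multiset Int) = (pool : Multiset Int)) (hlen : h.length ≤ 1) :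
    h.getD 0 0 = pool.getD 0 0 := by
  rcases Nat.lt_or_ge h.length 1 with h0 | h1
  · have hE : h = [] := List.length_eq_zero_iff.mp (by omega)
    have hplen : pool.length = h.length := by
      have := congrArg Multiset.card hms; simp at this; omega
    have hEp : pool = [] := List.length_eq_zero_iff.mp (by omega)
    rw [hE, hEp]
  · have hE : h.length = 1 := by omega
    obtain ⟨x, hx⟩ := List.length_eq_one_iff.mp hE
    have hperm : pool.Perm [x] := by
      rw [hx] at hms
      exact (Multiset.coe_eq_coe.mp hms.symm)
    have hEp : pool = [x] := List.perm_singleton.mp hperm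
    rw [hx, hEp]

theorem main_loop : ∀ fuel : Nat, ∀ h pool : List Int, ∀ K ans : Int,
    h.length ≤ fuel + 1 → IsHeap h → (h : Multiset Int) = (pool : Multiset Int) →
    solLoop fuel h K ans = altLoop fuel pool K ans := by
  intro fuel
  induction fuel with
  | zero =>
    intro h pool K ans hlen hh hms
    have hplen : pool.length = h.length := by
      have := congrArg Multiset.card hms; simp at this; omega
    rw [solLoop, altLoop, getD_zero_eq_of_small h pool hms (by omega)]
  | succ fuel ih =>
    intro h pool K ans hlen hh hms
    have hplen : pool.length = h.length := by
      have := congrArg Multiset.card hms; simp at this; omega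
    rw [solLoop, altLoop]
    by_cases h2 : 2 ≤ h.length
    · have hp2 : 2 ≤ pool.length := by omega
      have hpne : pool ≠ [] := by intro hE; rw [hE] at hplen; simp at hplen; omega
      have ha0 : h.getD 0 0 = (PySem.List.min? pool (fun x => x)).getD 0 :=
        heap_root_eq_min h pool hh hpne hms
      rw [if_pos h2, if_pos hp2, ha0]
      set a := (PySem.List.min? pool (fun x => x)).getD 0 with hadef
      by_cases hK : a ≥ K
      · rw [if_pos hK, if_pos hK]
      · rw [if_neg hK, if_neg hK]
        have hne : h ≠ [] := by intro hE; rw [hE] at h2; simp at h2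
        obtain ⟨pm1, pm2, pm3⟩ := popMin_spec pool hpne
        set p1 := (PySem.List.remove? pool a).getD [] with hp1def
        obtain ⟨q1, q2, q3⟩ := heappop_spec h hh hne
        rw [ha0, hms, ← pm3] at q3
        have hmsp : ((hqHeappop h).2 : Multiset Int) = (p1 : Multiset Int) :=
          cancel_singleton _ _ _ q3
        have hp1len : p1.length + 1 = pool.length := popMin_length pool hpne
        have hp1ne : p1 ≠ [] := by
          intro hE; rw [hE] at hp1len; simp at hp1len; omega
        obtain ⟨r1, r2, r3⟩ := heappop_spec (hqHeappop h).2 q2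
          (by intro hE; rw [hE] at hmsp
              have := congrArg Multiset.card hmsp; simp at this
              exact hp1ne (List.length_eq_zero_iff.mp this.symm))
        have hb0 : (hqHeappop h).2.getD 0 0 = (PySem.List.min? p1 (fun x => x)).getD 0 :=
          heap_root_eq_min _ p1 q2 hp1ne hmsp
        obtain ⟨sm1, sm2, sm3⟩ := popMin_spec p1 hp1ne
        set b := (PySem.List.min? p1 (fun x => x)).getD 0 with hbdef
        set p2 := (PySem.List.remove? p1 b).getD [] with hp2def
        rw [hb0, hmsp, ← sm3] at r3
        have hmsr : ((hqHeappop (hqHeappop h).2).2 : Multiset Int) = (p2 : Multiset Int) :=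
          cancel_singleton _ _ _ r3
        obtain ⟨w1, w2⟩ := heappush_spec (hqHeappop (hqHeappop h).2).2
          ((hqHeappop h).1 + (hqHeappop (hqHeappop h).2).1 * 2) r2
        have hval : (hqHeappop h).1 + (hqHeappop (hqHeappop h).2).1 * 2 = a + 2 * b := by
          rw [q1, r1, ha0, hb0]; ring
        have hp2len : p2.length + 1 = p1.length := popMin_length p1 hp1ne
        have hpushlen : (hqHeappush (hqHeappop (hqHeappop h).2).2
            ((hqHeappop h).1 + (hqHeappop (hqHeappop h).2).1 * 2)).length = p2.length + 1 := by
          have := congrArg Multiset.card w2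
          rw [hmsr] at this
          simpa using this
        apply ih _ _ K (ans + 1) (by omega) w1
        have coe_app : ∀ (l : List Int) (y : Int),
            ((l ++ [y] : List Int) : Multiset Int) = (l : Multiset Int) + {y} :=
          fun l y => (Multiset.cons_inj_right y).mp rfl
        rw [w2, hmsr, hval, coe_app]
    · have hnp2 : ¬ 2 ≤ pool.length := by omega
      rw [if_neg h2, if_neg hnp2, getD_zero_eq_of_small h pool hms (by omega)]

-- ===== VERDICT (by name: the statement is the Claim_ definition above) =====
theorem solution_spec : Claim_equal_solution := by
  intro scoville K _hdom _hpre
  unfold Spec_solution solution solution_alt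
  obtain ⟨hlen, hms, hheap⟩ := heapify_spec scoville
  exact main_loop scoville.length _ _ K 0 (by omega) hheap hms
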